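-- pv_equiv track=rewrite | github.com/jinwooseok/coding-test | bj/Main_18428.py | check
-- ===== SOURCE A (Python) =====
-- def check(result, rowterm, colterm, n):
--     for row, terms in rowterm.items():
--         for term in terms:
--             for res in result:
--                 if row == res//n and term[0] < res%n < term[1]:
--                     break
--             else:
--                 return False
--
--     for col, terms in colterm.items():
--         for term in terms:
--             for res in result:
--                 if col == res%n and term[0] < res//n < term[1]:
--                     break
--             else:
--                 return False
--     return True
-- ===== SOURCE B (Python) =====
-- def check(result, rowterm, colterm, n):
--     # Index the obstacles once: row -> list of its columns, col -> list of its rows.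
--     rows = {}
--     cols = {}
--     for res in result:
--         r, c = res // n, res % n
--         rows.setdefault(r, []).append(c)
--         cols.setdefault(c, []).append(r)
--     return all(any(lo < c < hi for c in rows.get(row, []))
--                for row, terms in rowterm.items() for lo, hi in terms) \
--         and all(any(lo < r < hi for r in cols.get(col, []))
--                 for col, terms in colterm.items() for lo, hi in terms)
-- ===== Notes on version B (the rewrite author's own statement) =====
-- stated objective: alternative
-- what changed: B builds a row->columns and col->rows index of the obstacles in one pass and then answers each sightline term by scanning only its own bucket with any/all, instead of A's triple nested for-else loop that rescans the whole obstacle list and recomputes res//n and res%n for every term.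
-- outside the precondition, e.g. on check([1], {0: []}, {}, 0): A returns True, B raises ZeroDivisionError
import Mathlib
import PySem

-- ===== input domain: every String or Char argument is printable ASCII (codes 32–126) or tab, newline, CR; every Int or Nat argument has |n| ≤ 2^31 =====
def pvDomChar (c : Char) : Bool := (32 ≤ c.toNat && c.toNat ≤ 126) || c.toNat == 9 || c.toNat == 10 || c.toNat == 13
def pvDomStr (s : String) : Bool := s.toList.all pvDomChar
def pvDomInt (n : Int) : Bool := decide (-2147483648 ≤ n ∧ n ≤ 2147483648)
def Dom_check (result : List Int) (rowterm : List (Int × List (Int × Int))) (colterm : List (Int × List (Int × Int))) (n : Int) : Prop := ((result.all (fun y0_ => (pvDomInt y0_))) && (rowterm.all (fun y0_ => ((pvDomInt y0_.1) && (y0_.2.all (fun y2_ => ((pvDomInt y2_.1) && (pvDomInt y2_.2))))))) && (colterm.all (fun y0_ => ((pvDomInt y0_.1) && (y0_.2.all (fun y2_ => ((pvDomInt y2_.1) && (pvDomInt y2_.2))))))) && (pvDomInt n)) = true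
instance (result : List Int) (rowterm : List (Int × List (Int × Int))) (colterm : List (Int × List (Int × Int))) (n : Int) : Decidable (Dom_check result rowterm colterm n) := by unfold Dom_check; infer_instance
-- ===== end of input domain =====

-- B indexes the obstacles once (row -> columns, col -> rows) and answers each term from its
-- own bucket, instead of A's rescanning of the whole obstacle list per term; same cost class.

-- ===== PORT A =====
-- A's for/break/else over `result` is a search (List.any); the for-else `return False` makes
-- each outer loop an `all`, short-circuited by `&&` like Python's early return.
def check (result : List Int) (rowterm : List (Int × List (Int × Int))) (colterm : List (Int × List (Int × Int))) (n : Int) : Bool :=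
  (rowterm.all (fun e =>
    e.2.all (fun term =>
      result.any (fun res =>
        e.1 == PySem.Int.floordiv res n &&
          (term.1 < PySem.Int.mod res n && PySem.Int.mod res n < term.2)))))
  &&
  (colterm.all (fun e =>
    e.2.all (fun term =>
      result.any (fun res =>
        e.1 == PySem.Int.mod res n &&
          (term.1 < PySem.Int.floordiv res n && PySem.Int.floordiv res n < term.2)))))

-- ===== PORT B =====
-- the one-pass index build: rows.setdefault(r,[]).append(c) / cols.setdefault(c,[]).append(r)
def checkAltIndex (result : List Int) (n : Int) :
    PySem.Dict Int (List Int) × PySem.Dict Int (List Int) :=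
  result.foldl
    (fun p res =>
      let r := PySem.Int.floordiv res n
      let c := PySem.Int.mod res n
      (p.1.insert r (p.1.getD r [] ++ [c]), p.2.insert c (p.2.getD c [] ++ [r])))
    (PySem.Dict.empty, PySem.Dict.empty)

def check_alt (result : List Int) (rowterm : List (Int × List (Int × Int))) (colterm : List (Int × List (Int × Int))) (n : Int) : Bool :=
  let idx := checkAltIndex result n
  (rowterm.all (fun e => e.2.all (fun t =>
      (idx.1.getD e.1 []).any (fun c => t.1 < c && c < t.2))))
  &&
  (colterm.all (fun e => e.2.all (fun t =>
      (idx.2.getD e.1 []).any (fun r => t.1 < r && r < t.2))))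

-- ===== PRECONDITION & SPEC =====
-- Pre_ excludes n == 0 with a nonempty result: there Python A either raises ZeroDivisionError
-- or (when every term list is empty) returns True, while B's upfront indexing always raises.
def Pre_check (result : List Int) (rowterm : List (Int × List (Int × Int))) (colterm : List (Int × List (Int × Int))) (n : Int) : Prop :=
  result = [] ∨ n ≠ 0
instance (result : List Int) (rowterm : List (Int × List (Int × Int))) (colterm : List (Int × List (Int × Int))) (n : Int) : Decidable (Pre_check result rowterm colterm n) := by unfold Pre_check; infer_instance

def pvWitness_check : List Int × (List (Int × List (Int × Int))) × (List (Int × List (Int × Int))) × Int :=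
  ([3], [(1, [(0, 2)])], [(1, [(0, 2)])], 2)

def Spec_check (result : List Int) (rowterm : List (Int × List (Int × Int))) (colterm : List (Int × List (Int × Int))) (n : Int) (out : Bool) : Prop := out = check_alt result rowterm colterm n
instance (result : List Int) (rowterm : List (Int × List (Int × Int))) (colterm : List (Int × List (Int × Int))) (n : Int) (out : Bool) : Decidable (Spec_check result rowterm colterm n out) := by unfold Spec_check; infer_instance

-- ===== CLAIM (what is proved, stated in full; the proofs are below) =====
def Claim_equal_check : Prop := ∀ (result : List Int) (rowterm : List (Int × List (Int × Int))) (colterm : List (Int × List (Int × Int))) (n : Int), Dom_check result rowterm colterm n → Pre_check result rowterm colterm n → Spec_check result rowterm colterm n (check result rowterm colterm n)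

-- ===== LEMMAS AND PROOFS =====


theorem pvAllCongr {α : Type} {l : List α} {p q : α → Bool}
    (h : ∀ a ∈ l, p a = q a) : l.all p = l.all q := by
  induction l with
  | nil => rfl
  | cons x xs ih => simp_all [List.all_cons]

theorem pvAnyCongr {α : Type} {l : List α} {p q : α → Bool}
    (h : ∀ a ∈ l, p a = q a) : l.any p = l.any q := by
  induction l with
  | nil => rfl
  | cons x xs ih => simp_all [List.any_cons]

-- the row bucket of the index is exactly the columns of the obstacles in that row, in order
theorem checkAltIndex_fst_getD (result : List Int) (n : Int) (d1 d2 : PySem.Dict Int (List Int)) (k : Int) :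
    ((result.foldl
      (fun p res =>
        let r := PySem.Int.floordiv res n
        let c := PySem.Int.mod res n
        (p.1.insert r (p.1.getD r [] ++ [c]), p.2.insert c (p.2.getD c [] ++ [r])))
      (d1, d2)).1.getD k []) =
    d1.getD k [] ++ (result.filter (fun res => PySem.Int.floordiv res n == k)).map
      (fun res => PySem.Int.mod res n) := by
  induction result generalizing d1 d2 with
  | nil => simp
  | cons res rest ih =>
      simp only [List.foldl_cons, List.filter_cons]
      rw [ih]
      by_cases h : PySem.Int.floordiv res n = k
      · simp [h, PySem.Dict.getD_insert]
      · simp [h, PySem.Dict.getD_insert, Ne.symm h]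

theorem checkAltIndex_snd_getD (result : List Int) (n : Int) (d1 d2 : PySem.Dict Int (List Int)) (k : Int) :
    ((result.foldl
      (fun p res =>
        let r := PySem.Int.floordiv res n
        let c := PySem.Int.mod res n
        (p.1.insert r (p.1.getD r [] ++ [c]), p.2.insert c (p.2.getD c [] ++ [r])))
      (d1, d2)).2.getD k []) =
    d2.getD k [] ++ (result.filter (fun res => PySem.Int.mod res n == k)).map
      (fun res => PySem.Int.floordiv res n) := by
  induction result generalizing d1 d2 with
  | nil => simp
  | cons res rest ih =>
      simp only [List.foldl_cons, List.filter_cons]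
      rw [ih]
      by_cases h : PySem.Int.mod res n = k
      · simp [h, PySem.Dict.getD_insert]
      · simp [h, PySem.Dict.getD_insert, Ne.symm h]

-- ===== VERDICT (by name: the statement is the Claim_ definition above) =====
theorem check_spec : Claim_equal_check := by
  intro result rowterm colterm n _ _
  unfold Spec_check check check_alt checkAltIndex
  apply congrArg₂ (fun a b => a && b)
  · apply pvAllCongr; intro e _
    apply pvAllCongr; intro t _
    rw [checkAltIndex_fst_getD]
    simp only [PySem.Dict.getD_empty, List.nil_append, List.any_map, List.any_filter,
      Function.comp]
    apply pvAnyCongr; intro res _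
    by_cases h : PySem.Int.floordiv res n = e.1
    · simp [h]
    · rw [beq_false_of_ne h, beq_false_of_ne (Ne.symm h)]
  · apply pvAllCongr; intro e _
    apply pvAllCongr; intro t _
    rw [checkAltIndex_snd_getD]
    simp only [PySem.Dict.getD_empty, List.nil_append, List.any_map, List.any_filter,
      Function.comp]
    apply pvAnyCongr; intro res _
    by_cases h : PySem.Int.mod res n = e.1
    · simp [h]
    · rw [beq_false_of_ne h, beq_false_of_ne (Ne.symm h)]
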